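-- pv_equiv track=rewrite | github.com/Prezens/algorithms_on_python | sorts/smoothsort.py | heap_division
-- ===== SOURCE A (Python) =====
-- def count_indexes(i, indexes):
--     indexes.append(2 * indexes[i] + 1)
--     indexes.append(2 * indexes[i] + 2)
--
--     return indexes
--
-- def get_list(indexPart, heap):
--     heap_part = []
--     for i in indexPart:
--         if i < len(heap):
--             heap_part.append(heap[i])
--
--     return heap_part
--
-- def heap_division(heap):
--     index = 0
--     indexes_left = [1]
--     indexes_right = [2]
--     while indexes_left[-1] < len(heap):
--         indexes_left = count_indexes(index, indexes_left)
--         indexes_right = count_indexes(index, indexes_right)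
--
--         index += 1
--
--     heap_left = get_list(indexes_left, heap)
--     heap_right = get_list(indexes_right, heap)
--
--     return heap_left, heap_right
-- ===== SOURCE B (Python) =====
-- def heap_division(heap):
--     heap_left = []
--     heap_right = []
--     for i in range(1, len(heap)):
--         r = i
--         while r > 2:
--             r = (r - 1) // 2
--         if r == 1:
--             heap_left.append(heap[i])
--         elif r == 2:
--             heap_right.append(heap[i])
--     return heap_left, heap_right
-- ===== Notes on version B (the rewrite author's own statement) =====
-- stated objective: simpler
-- what changed: One linear pass over indices 1..len-1 classifying each index into the left/right subtree by walking up parents, instead of BFS-expanding two unbounded index lists and then filtering them against the heap length.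
import Mathlib
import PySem

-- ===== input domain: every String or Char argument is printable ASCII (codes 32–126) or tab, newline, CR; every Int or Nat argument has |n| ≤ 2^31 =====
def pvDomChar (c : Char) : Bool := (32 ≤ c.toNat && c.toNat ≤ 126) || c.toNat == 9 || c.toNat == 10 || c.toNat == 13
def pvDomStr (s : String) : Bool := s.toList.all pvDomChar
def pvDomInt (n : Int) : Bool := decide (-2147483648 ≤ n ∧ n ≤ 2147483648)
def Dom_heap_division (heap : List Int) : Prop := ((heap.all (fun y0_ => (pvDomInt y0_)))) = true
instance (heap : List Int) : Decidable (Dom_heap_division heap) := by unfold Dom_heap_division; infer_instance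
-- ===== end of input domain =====

-- B replaces A's BFS expansion of two index lists by a single pass over indices 1..len-1,
-- classifying each index into the left or right subtree by walking up parents (same return value).

-- ===== PORT A =====
-- count_indexes(i, indexes): appends 2*indexes[i]+1 and 2*indexes[i]+2 (the pyGet? is always
-- in range here; the none branch is an unreachable totality guard)
def pvCountIndexes (i : Int) (indexes : List Int) : List Int :=
  match PySem.List.pyGet? indexes i with
  | some v => (indexes ++ [2 * v + 1]) ++ [2 * v + 2]
  | none => indexes

-- get_list(indexPart, heap)
def pvGetList (indexPart : List Int) (heap : List Int) : List Int :=
  indexPart.foldl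
    (fun acc i => if i < (heap.length : Int) then acc ++ (PySem.List.pyGet? heap i).toList else acc) []

-- the while loop of heap_division; fuel = len(heap)+1 is enough (proved in the lemmas below:
-- the last left index after k iterations is at least 2k+1, so at most ⌈len/2⌉ iterations run)
def pvLoopA (n : Int) : Nat → Int → List Int → List Int → List Int × List Int
  | 0, _, L, R => (L, R)
  | f + 1, index, L, R =>
    match PySem.List.pyGet? L (-1) with
    | some last =>
        if last < n then
          pvLoopA n f (index + 1) (pvCountIndexes index L) (pvCountIndexes index R)
        else (L, R)
    | none => (L, R)

def heap_division (heap : List Int) : List Int × List Int :=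
  let st := pvLoopA (heap.length : Int) (heap.length + 1) 0 [1] [2]
  (pvGetList st.1 heap, pvGetList st.2 heap)

-- ===== PORT B =====
-- r = i; while r > 2: r = (r - 1) // 2
def pvClass (r : Int) : Int :=
  if 2 < r then pvClass (PySem.Int.floordiv (r - 1) 2) else r
termination_by r.toNat
decreasing_by
  rw [PySem.Int.floordiv_eq_ediv_of_pos (by omega : (0:Int) < 2)]; omega

def heap_division_alt (heap : List Int) : List Int × List Int :=
  (PySem.List.pyRange 1 (heap.length : Int) 1).foldl
    (fun acc i =>
      let r := pvClass i
      if r = 1 then (acc.1 ++ (PySem.List.pyGet? heap i).toList, acc.2)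
      else if r = 2 then (acc.1, acc.2 ++ (PySem.List.pyGet? heap i).toList)
      else acc)
    ([], [])

-- ===== PRECONDITION & SPEC =====
def Spec_heap_division (heap : List Int) (out : List Int × List Int) : Prop := out = heap_division_alt heap
instance (heap : List Int) (out : List Int × List Int) : Decidable (Spec_heap_division heap out) := by unfold Spec_heap_division; infer_instance

-- ===== CLAIM (what is proved, stated in full; the proofs are below) =====
def Claim_equal_heap_division : Prop := ∀ (heap : List Int), Dom_heap_division heap → Spec_heap_division heap (heap_division heap)

-- ===== LEMMAS AND PROOFS =====

-- pvSub b t = the t-th index (in increasing = level order) of the subtree rooted at b (b = 1 left, b = 2 right)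
def pvSub (b : Nat) : Nat → Nat
  | 0 => b
  | t + 1 => 2 * pvSub b (t / 2) + (if t % 2 = 0 then 1 else 2)
termination_by t => t
decreasing_by omega

-- Nat version of B's parent walk
def pvCls (m : Nat) : Nat :=
  if 2 < m then pvCls ((m - 1) / 2) else m
termination_by m
decreasing_by omega

lemma pvSub_zero (b : Nat) : pvSub b 0 = b := by rw [pvSub]

lemma pvSub_odd (b t : Nat) : pvSub b (2 * t + 1) = 2 * pvSub b t + 1 := by
  rw [show 2 * t + 1 = (2 * t) + 1 from rfl, pvSub]
  simp [Nat.mul_mod_right]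

lemma pvSub_even (b t : Nat) : pvSub b (2 * t + 2) = 2 * pvSub b t + 2 := by
  rw [show 2 * t + 2 = (2 * t + 1) + 1 from rfl, pvSub]
  have h1 : (2 * t + 1) / 2 = t := by omega
  have h2 : (2 * t + 1) % 2 = 1 := by omega
  simp [h1, h2]

lemma pvSub_lt_succ (b : Nat) : ∀ t, pvSub b t < pvSub b (t + 1) := by
  intro t
  induction t using Nat.strong_induction_on with
  | _ t ih =>
    rcases Nat.even_or_odd t with ⟨s, hs⟩ | ⟨s, hs⟩
    · rcases s with _ | s'
      · subst hs
        have h1 : pvSub b (2 * 0 + 1) = 2 * pvSub b 0 + 1 := pvSub_odd b 0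
        simp at h1 ⊢
        omega
      · have ht : t = 2 * s' + 2 := by omega
        have h1 : pvSub b (2 * s' + 2) = 2 * pvSub b s' + 2 := pvSub_even b s'
        have h2 : pvSub b (2 * (s' + 1) + 1) = 2 * pvSub b (s' + 1) + 1 := pvSub_odd b (s' + 1)
        have h3 : pvSub b s' < pvSub b (s' + 1) := ih s' (by omega)
        rw [ht, show 2 * s' + 2 + 1 = 2 * (s' + 1) + 1 from by ring]
        omega
    · have ht : t = 2 * s + 1 := by omega
      have h1 : pvSub b (2 * s + 1) = 2 * pvSub b s + 1 := pvSub_odd b s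
      have h2 : pvSub b (2 * s + 2) = 2 * pvSub b s + 2 := pvSub_even b s
      rw [ht, show 2 * s + 1 + 1 = 2 * s + 2 from rfl]
      omega

lemma pvSub_strictMono (b : Nat) : StrictMono (pvSub b) :=
  strictMono_nat_of_lt_succ (pvSub_lt_succ b)

lemma pvSub_ge (b : Nat) : ∀ t, t + b ≤ pvSub b t := by
  intro t
  induction t with
  | zero => simp [pvSub_zero]
  | succ t ih => have := pvSub_lt_succ b t; omega

-- at the same position, the left-subtree index is the smallest over all roots b ≥ 1
lemma pvSub_one_le (b : Nat) (hb : 1 ≤ b) : ∀ t, pvSub 1 t ≤ pvSub b t := by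
  intro t
  induction t using Nat.strong_induction_on with
  | _ t ih =>
    cases t with
    | zero => simpa [pvSub_zero] using hb
    | succ t =>
      rw [pvSub, pvSub]
      have := ih (t / 2) (by omega)
      omega

lemma pvCls_zero : pvCls 0 = 0 := by rw [pvCls]; simp

lemma pvCls_pvSub (b : Nat) (hb1 : 1 ≤ b) (hb2 : b ≤ 2) : ∀ t, pvCls (pvSub b t) = b := by
  intro t
  induction t using Nat.strong_induction_on with
  | _ t ih =>
    cases t with
    | zero =>
      rw [pvSub_zero, pvCls]
      simp [Nat.not_lt.mpr hb2]
    | succ t =>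
      have hge : b ≤ pvSub b (t / 2) := by have := pvSub_ge b (t / 2); omega
      rw [pvSub, pvCls]
      have hgt : 2 < 2 * pvSub b (t / 2) + (if t % 2 = 0 then 1 else 2) := by
        split <;> omega
      rw [if_pos hgt]
      have harg : (2 * pvSub b (t / 2) + (if t % 2 = 0 then 1 else 2) - 1) / 2 = pvSub b (t / 2) := by
        split <;> omega
      rw [harg]
      exact ih (t / 2) (by omega)

lemma pvCls_surj (b : Nat) (hb1 : 1 ≤ b) (hb2 : b ≤ 2) :
    ∀ m, pvCls m = b → ∃ t, pvSub b t = m := by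
  intro m
  induction m using Nat.strong_induction_on with
  | _ m ih =>
    intro hm
    by_cases h2 : 2 < m
    · rw [pvCls, if_pos h2] at hm
      obtain ⟨t, ht⟩ := ih ((m - 1) / 2) (by omega) hm
      rcases Nat.even_or_odd m with ⟨s, hs⟩ | ⟨s, hs⟩
      · refine ⟨2 * t + 2, ?_⟩
        rw [pvSub_even, ht]
        omega
      · refine ⟨2 * t + 1, ?_⟩
        rw [pvSub_odd, ht]
        omega
    · rw [pvCls, if_neg h2] at hm
      exact ⟨0, by rw [pvSub_zero]; omega⟩

lemma pvClass_eq_pvCls : ∀ m : Nat, pvClass (m : Int) = ((pvCls m : Nat) : Int) := by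
  intro m
  induction m using Nat.strong_induction_on with
  | _ m ih =>
    rw [pvClass, pvCls]
    by_cases h2 : 2 < m
    · rw [if_pos (by exact_mod_cast h2), if_pos h2]
      have hc : (m : Int) - 1 = ((m - 1 : Nat) : Int) := by omega
      have hfd : PySem.Int.floordiv ((m - 1 : Nat) : Int) 2 = (((m - 1) / 2 : Nat) : Int) := by
        exact_mod_cast PySem.Int.floordiv_natCast (m - 1) 2
      rw [hc, hfd]
      exact ih ((m - 1) / 2) (by omega)
    · rw [if_neg (by exact_mod_cast h2), if_neg h2]

-- the index list held by A's loop after k iterations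
def pvMapSub (b k : Nat) : List Int := (List.range k).map (fun t => ((pvSub b t : Nat) : Int))

lemma pvCountIndexes_step (b k : Nat) :
    pvCountIndexes (k : Int) (pvMapSub b (2 * k + 1)) = pvMapSub b (2 * k + 3) := by
  unfold pvCountIndexes
  have hget : PySem.List.pyGet? (pvMapSub b (2 * k + 1)) (k : Int)
      = some ((pvSub b k : Nat) : Int) := by
    rw [PySem.List.pyGet?_natCast]
    simp [pvMapSub, show k < 2 * k + 1 from by omega]
  rw [hget]
  unfold pvMapSub
  conv_rhs => rw [show 2 * k + 3 = (2 * k + 2) + 1 from rfl, List.range_succ,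
      show 2 * k + 2 = (2 * k + 1) + 1 from rfl, List.range_succ]
  simp only [List.map_append, List.map_cons, List.map_nil, List.append_assoc]
  congr 1
  simp only [pvSub_odd, pvSub_even]
  push_cast
  rfl

lemma pvMapSub_last (b k : Nat) :
    PySem.List.pyGet? (pvMapSub b (2 * k + 1)) (-1) = some ((pvSub b (2 * k) : Nat) : Int) := by
  rw [PySem.List.pyGet?_neg_one]
  unfold pvMapSub
  rw [List.range_succ]
  simp

lemma pvLoopA_run (n K : Nat) (hK : n ≤ pvSub 1 (2 * K)) (hmin : ∀ j < K, pvSub 1 (2 * j) < n) :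
    ∀ f k, k ≤ K → K < k + f →
      pvLoopA (n : Int) f (k : Int) (pvMapSub 1 (2 * k + 1)) (pvMapSub 2 (2 * k + 1))
        = (pvMapSub 1 (2 * K + 1), pvMapSub 2 (2 * K + 1)) := by
  intro f
  induction f with
  | zero => intro k h1 h2; omega
  | succ f ih =>
    intro k h1 h2
    rw [pvLoopA, pvMapSub_last]
    dsimp only
    by_cases hkK : k = K
    · subst hkK
      rw [if_neg (by exact_mod_cast Nat.not_lt.mpr hK)]
    · have hk : k < K := by omega
      have hlt : pvSub 1 (2 * k) < n := hmin k hk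
      rw [if_pos (by exact_mod_cast hlt)]
      rw [pvCountIndexes_step, pvCountIndexes_step]
      have hcast : ((k : Int) + 1) = ((k + 1 : Nat) : Int) := by push_cast; ring
      rw [hcast, show 2 * k + 3 = 2 * (k + 1) + 1 from rfl]
      exact ih (k + 1) (by omega) (by omega)

-- two strictly increasing lists of naturals with the same members are equal
lemma pvPairwiseLt_ext : ∀ (l₁ l₂ : List Nat), l₁.Pairwise (· < ·) → l₂.Pairwise (· < ·) →
    (∀ m, m ∈ l₁ ↔ m ∈ l₂) → l₁ = l₂ := by
  intro l₁
  induction l₁ with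
  | nil =>
    intro l₂ _ _ hmem
    cases l₂ with
    | nil => rfl
    | cons b l => exact absurd ((hmem b).mpr (by simp)) (by simp)
  | cons a l ih =>
    intro l₂ h₁ h₂ hmem
    cases l₂ with
    | nil => exact absurd ((hmem a).mp (by simp)) (by simp)
    | cons b l' =>
      have hab : a = b := by
        rcases List.mem_cons.mp ((hmem a).mp (by simp)) with h | h
        · exact h
        · rcases List.mem_cons.mp ((hmem b).mpr (by simp)) with h' | h'
          · exact h'.symm
          · have hba := (List.pairwise_cons.mp h₂).1 a h
            have hab' := (List.pairwise_cons.mp h₁).1 b h'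
            omega
      subst hab
      have htail : ∀ m, m ∈ l ↔ m ∈ l' := by
        intro m
        constructor
        · intro hm
          have ham : a < m := (List.pairwise_cons.mp h₁).1 m hm
          rcases List.mem_cons.mp ((hmem m).mp (by simp [hm])) with h | h
          · omega
          · exact h
        · intro hm
          have ham : a < m := (List.pairwise_cons.mp h₂).1 m hm
          rcases List.mem_cons.mp ((hmem m).mpr (by simp [hm])) with h | h
          · omega
          · exact h
      rw [ih l' (List.pairwise_cons.mp h₁).2 (List.pairwise_cons.mp h₂).2 htail]

-- the heap values at a list of (non-negative) indices
def pvVals (heap : List Int) (idx : List Nat) : List Int :=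
  idx.flatMap (fun m => (PySem.List.pyGet? heap (m : Int)).toList)

-- A's filtered BFS index list = the increasing list of all indices of class b below n
lemma pvIdxA (b n K : Nat) (hb1 : 1 ≤ b) (hb2 : b ≤ 2) (hK : n ≤ pvSub 1 (2 * K)) :
    ((List.range (2 * K + 1)).map (pvSub b)).filter (fun m => decide (m < n))
      = (List.range n).filter (fun m => decide (pvCls m = b)) := by
  apply pvPairwiseLt_ext
  · exact ((List.pairwise_lt_range).map _ (fun _ _ h => (pvSub_strictMono b) h)).filter _
  · exact (List.pairwise_lt_range).filter _
  · intro m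
    simp only [List.mem_filter, List.mem_map, List.mem_range, decide_eq_true_eq]
    constructor
    · rintro ⟨⟨t, _, rfl⟩, hlt⟩
      exact ⟨hlt, pvCls_pvSub b hb1 hb2 t⟩
    · rintro ⟨hlt, hcls⟩
      obtain ⟨t, rfl⟩ := pvCls_surj b hb1 hb2 m hcls
      refine ⟨⟨t, ?_, rfl⟩, hlt⟩
      by_contra h
      have h2K : 2 * K ≤ t := by omega
      have hm1 := (pvSub_strictMono 1).monotone h2K
      have hm2 := pvSub_one_le b hb1 t
      omega

-- B's index list (1..n-1 in order) filtered by class = the same canonical list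
lemma pvIdxB (b n : Nat) (hb1 : 1 ≤ b) :
    ((List.range (n - 1)).map (fun k => k + 1)).filter (fun m => decide (pvCls m = b))
      = (List.range n).filter (fun m => decide (pvCls m = b)) := by
  apply pvPairwiseLt_ext
  · exact ((List.pairwise_lt_range).map _ (fun _ _ h => by omega)).filter _
  · exact (List.pairwise_lt_range).filter _
  · intro m
    simp only [List.mem_filter, List.mem_map, List.mem_range, decide_eq_true_eq]
    constructor
    · rintro ⟨⟨k, hk, rfl⟩, hcls⟩
      exact ⟨by omega, hcls⟩
    · rintro ⟨hlt, hcls⟩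
      have hm0 : m ≠ 0 := by
        intro h; rw [h, pvCls_zero] at hcls; omega
      exact ⟨⟨m - 1, by omega, by omega⟩, hcls⟩

-- A's get_list on a list of cast natural indices, characterised
lemma pvGetList_natIdx (heap : List Int) : ∀ (ts : List Nat) (acc : List Int),
    (ts.map (fun t : Nat => (t : Int))).foldl
      (fun acc i => if i < (heap.length : Int) then acc ++ (PySem.List.pyGet? heap i).toList else acc) acc
      = acc ++ pvVals heap (ts.filter (fun m => decide (m < heap.length))) := by
  intro ts
  induction ts with
  | nil => intro acc; simp [pvVals]
  | cons t ts ih =>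
    intro acc
    simp only [List.map_cons, List.foldl_cons]
    by_cases h : t < heap.length
    · rw [if_pos (by exact_mod_cast h)]
      rw [ih]
      simp [pvVals, List.filter_cons, h]
    · rw [if_neg (by exact_mod_cast h)]
      rw [ih]
      simp [List.filter_cons, h]

lemma pvGetList_eq (heap : List Int) (ts : List Nat) :
    pvGetList (ts.map (fun t : Nat => (t : Int))) heap
      = pvVals heap (ts.filter (fun m => decide (m < heap.length))) := by
  unfold pvGetList
  rw [pvGetList_natIdx]
  simp

-- B's classifying fold over cast natural indices, characterised
lemma pvAltFold (heap : List Int) : ∀ (ts : List Nat) (accL accR : List Int),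
    (ts.map (fun t : Nat => (t : Int))).foldl
      (fun acc i =>
        let r := pvClass i
        if r = 1 then (acc.1 ++ (PySem.List.pyGet? heap i).toList, acc.2)
        else if r = 2 then (acc.1, acc.2 ++ (PySem.List.pyGet? heap i).toList)
        else acc)
      (accL, accR)
      = (accL ++ pvVals heap (ts.filter (fun m => decide (pvCls m = 1))),
         accR ++ pvVals heap (ts.filter (fun m => decide (pvCls m = 2)))) := by
  intro ts
  induction ts with
  | nil => intro accL accR; simp [pvVals]
  | cons t ts ih =>
    intro accL accR
    simp only [List.map_cons, List.foldl_cons, pvClass_eq_pvCls t]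
    by_cases h1 : pvCls t = 1
    · rw [if_pos (by exact_mod_cast h1)]
      rw [ih]
      simp [pvVals, List.filter_cons, h1]
    · rw [if_neg (by exact_mod_cast h1)]
      by_cases h2 : pvCls t = 2
      · rw [if_pos (by exact_mod_cast h2)]
        rw [ih]
        simp [pvVals, List.filter_cons, h1, h2]
      · rw [if_neg (by exact_mod_cast h2)]
        rw [ih]
        simp [List.filter_cons, h1, h2]

-- ===== VERDICT (by name: the statement is the Claim_ definition above) =====
theorem heap_division_spec : Claim_equal_heap_division := by
  intro heap _
  unfold Spec_heap_division
  have hex : ∃ k, heap.length ≤ pvSub 1 (2 * k) := ⟨heap.length, by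
    have := pvSub_ge 1 (2 * heap.length); omega⟩
  set n := heap.length with hn
  have hK : n ≤ pvSub 1 (2 * Nat.find hex) := Nat.find_spec hex
  have hmin : ∀ j < Nat.find hex, pvSub 1 (2 * j) < n :=
    fun j hj => Nat.lt_of_not_le (Nat.find_min hex hj)
  have hKle : Nat.find hex ≤ n := Nat.find_le (by have := pvSub_ge 1 (2 * n); omega)
  set K := Nat.find hex with hKdef
  -- A side
  unfold heap_division
  have hrun := pvLoopA_run n K hK hmin (n + 1) 0 (by omega) (by omega)
  have hinit1 : pvMapSub 1 (2 * 0 + 1) = [(1 : Int)] := by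
    simp [pvMapSub, pvSub_zero]
  have hinit2 : pvMapSub 2 (2 * 0 + 1) = [(2 : Int)] := by
    simp [pvMapSub, pvSub_zero]
  rw [hinit1, hinit2] at hrun
  simp only [Nat.cast_zero] at hrun
  rw [hrun]
  -- B side
  unfold heap_division_alt
  have hrange : PySem.List.pyRange 1 (n : Int) 1
      = ((List.range (n - 1)).map (fun k => k + 1)).map (fun t : Nat => (t : Int)) := by
    rw [PySem.List.pyRange_one]
    rw [show ((n : Int) - 1).toNat = n - 1 from by omega]
    rw [List.map_map]
    apply List.map_congr_left
    intro a _
    simp [Function.comp]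
    ring
  rw [hrange, pvAltFold]
  simp only [List.nil_append]
  rw [pvIdxB 1 n (by omega), pvIdxB 2 n (by omega)]
  -- A components
  have hA : ∀ b, pvMapSub b (2 * K + 1) = ((List.range (2 * K + 1)).map (pvSub b)).map (fun t : Nat => (t : Int)) := by
    intro b; unfold pvMapSub; rw [List.map_map]; rfl
  rw [hA 1, hA 2, pvGetList_eq, pvGetList_eq, ← hn]
  rw [pvIdxA 1 n K (by omega) (by omega) hK, pvIdxA 2 n K (by omega) (by omega) hK]
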